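-- pv_equiv track=rewrite | github.com/hieuducnguyen/BigOCourse | 20_backtracking/5_Dreamoon_and_WiFi.py | count_val
-- ===== SOURCE A (Python) =====
-- def count_val(line):
--     val = 0
--     for sign in line:
--         if sign == "+":
--             val += 1
--         else:
--             val -= 1
--     return val
-- ===== SOURCE B (Python) =====
-- def count_val(line):
--     p = line.count("+")
--     return 2 * p - len(line)
-- ===== Notes on version B (the rewrite author's own statement) =====
-- stated objective: simpler
-- what changed: Replaces the per-character accumulator loop with the closed form 2*p - len(line) where p is the number of plus signs counted once: no branch, no running state.
import Mathlib
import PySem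

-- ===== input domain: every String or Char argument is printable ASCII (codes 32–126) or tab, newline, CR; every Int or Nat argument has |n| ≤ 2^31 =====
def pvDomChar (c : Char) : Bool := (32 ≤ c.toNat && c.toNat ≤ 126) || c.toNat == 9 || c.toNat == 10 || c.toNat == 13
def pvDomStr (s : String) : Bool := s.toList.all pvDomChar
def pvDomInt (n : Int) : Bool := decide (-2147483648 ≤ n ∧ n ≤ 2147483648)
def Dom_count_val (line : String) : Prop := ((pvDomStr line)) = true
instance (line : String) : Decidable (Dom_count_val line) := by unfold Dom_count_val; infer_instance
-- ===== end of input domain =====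

-- B computes the same value by the closed form 2*count('+') - len, no accumulator loop.

-- ===== PORT A =====
def count_val (line : String) : Int :=
  line.toList.foldl (fun val sign => if sign == '+' then val + 1 else val - 1) 0

-- ===== PORT B =====
def count_val_alt (line : String) : Int :=
  2 * (PySem.Str.count line "+" : Int) - (PySem.Str.len line : Int)

-- ===== PRECONDITION & SPEC =====
def Spec_count_val (line : String) (out : Int) : Prop := out = count_val_alt line
instance (line : String) (out : Int) : Decidable (Spec_count_val line out) := by unfold Spec_count_val; infer_instance

-- ===== CLAIM (what is proved, stated in full; the proofs are below) =====
def Claim_equal_count_val : Prop := ∀ (line : String), Dom_count_val line → Spec_count_val line (count_val line)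

-- ===== LEMMAS AND PROOFS =====

lemma count_val_foldl (l : List Char) (a : Int) :
    l.foldl (fun val sign => if sign == '+' then val + 1 else val - 1) a
      = a + 2 * (l.count '+' : Int) - (l.length : Int) := by
  induction l generalizing a with
  | nil => simp
  | cons c t ih =>
    simp only [List.foldl_cons, ih, List.count_cons, List.length_cons]
    by_cases h : c = '+' <;> simp [h] <;> omega

lemma go_single (c : Char) (l : List Char) (acc fuel : Nat) (h : l.length ≤ fuel) :
    PySem.Chars.count.go [c] fuel l acc = acc + l.count c := by
  induction l generalizing acc fuel with
  | nil => cases fuel <;> simp [PySem.Chars.count.go]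
  | cons x t ih =>
    cases fuel with
    | zero => simp at h
    | succ n =>
      simp only [List.length_cons, Nat.succ_le_succ_iff] at h
      rw [PySem.Chars.count.go]
      by_cases hx : x = c
      · simp [hx, List.isPrefixOf, ih _ _ h]
        omega
      · simp [List.isPrefixOf, hx, ih _ _ h, Ne.symm hx]

lemma str_count_plus (s : String) :
    (PySem.Str.count s "+" : Int) = (s.toList.count '+' : Int) := by
  have : PySem.Chars.count s.toList ['+'] = s.toList.count '+' := by
    simp [PySem.Chars.count, go_single]
  simp [PySem.Str.count_eq]
  exact this

-- ===== VERDICT (by name: the statement is the Claim_ definition above) =====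
theorem count_val_spec : Claim_equal_count_val := by
  intro line _
  unfold Spec_count_val count_val count_val_alt
  rw [count_val_foldl, str_count_plus]
  simp [PySem.Str.len_eq]
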